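-- pv_equiv track=rewrite | github.com/Parkyes90/algo | leetcode/1601~1700/1662. Check If Two String Arrays are Equivalent.py | arrayStringsAreEqual
-- ===== SOURCE A (Python) =====
-- from typing import List
--
-- def arrayStringsAreEqual(word1: List[str], word2: List[str]) -> bool:
--     w1 = ""
--     w2 = ""
--     for piece in word1:
--         w1 += piece
--     for piece in word2:
--         w2 += piece
--     return w1 == w2
-- ===== SOURCE B (Python) =====
-- def arrayStringsAreEqual(word1, word2):
--     # Stream the characters of each array lazily and compare in lockstep,
--     # never building the concatenated strings; early exit on first mismatch.
--     chars1 = (c for piece in word1 for c in piece)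
--     chars2 = (c for piece in word2 for c in piece)
--     while True:
--         a = next(chars1, None)
--         b = next(chars2, None)
--         if a != b:
--             return False
--         if a is None:
--             return True
-- ===== Notes on version B (the rewrite author's own statement) =====
-- stated objective: alternative
-- what changed: B compares the two char streams lazily in lockstep with zip_longest and early exit instead of building both concatenated strings and comparing them.
import Mathlib
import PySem

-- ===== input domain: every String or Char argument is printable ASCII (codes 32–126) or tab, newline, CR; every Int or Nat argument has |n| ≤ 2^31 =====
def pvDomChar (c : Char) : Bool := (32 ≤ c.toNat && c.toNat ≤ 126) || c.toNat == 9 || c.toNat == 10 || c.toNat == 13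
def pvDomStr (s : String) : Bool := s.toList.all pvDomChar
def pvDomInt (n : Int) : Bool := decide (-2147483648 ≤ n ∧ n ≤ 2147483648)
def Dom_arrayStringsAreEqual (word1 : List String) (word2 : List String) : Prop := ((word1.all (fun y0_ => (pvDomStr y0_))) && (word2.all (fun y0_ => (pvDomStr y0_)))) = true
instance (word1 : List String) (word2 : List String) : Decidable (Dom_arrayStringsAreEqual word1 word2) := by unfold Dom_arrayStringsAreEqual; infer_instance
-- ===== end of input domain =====

-- B streams the characters of both arrays and compares them in lockstep with early
-- exit instead of building the two concatenated strings (objective: alternative).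

-- ===== PORT A =====
def arrayStringsAreEqual (word1 : List String) (word2 : List String) : Bool :=
  let w1 := word1.foldl (fun acc piece => acc ++ piece) ""
  let w2 := word2.foldl (fun acc piece => acc ++ piece) ""
  w1 == w2

-- ===== PORT B =====
-- lockstep comparison of the two char streams (the while-loop of Source B)
def pvEqChars : List Char → List Char → Bool
  | [], [] => true
  | [], _ :: _ => false
  | _ :: _, [] => false
  | a :: as, b :: bs => a == b && pvEqChars as bs

def arrayStringsAreEqual_alt (word1 : List String) (word2 : List String) : Bool :=
  -- chars1/chars2: the lazily flattened character streams of Source B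
  pvEqChars (word1.flatMap String.toList) (word2.flatMap String.toList)

-- ===== PRECONDITION & SPEC =====
def Spec_arrayStringsAreEqual (word1 : List String) (word2 : List String) (out : Bool) : Prop := out = arrayStringsAreEqual_alt word1 word2
instance (word1 : List String) (word2 : List String) (out : Bool) : Decidable (Spec_arrayStringsAreEqual word1 word2 out) := by unfold Spec_arrayStringsAreEqual; infer_instance

-- ===== CLAIM (what is proved, stated in full; the proofs are below) =====
def Claim_equal_arrayStringsAreEqual : Prop := ∀ (word1 : List String) (word2 : List String), Dom_arrayStringsAreEqual word1 word2 → Spec_arrayStringsAreEqual word1 word2 (arrayStringsAreEqual word1 word2)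

-- ===== LEMMAS AND PROOFS =====
theorem pvFoldl_toList (l : List String) (init : String) :
    (l.foldl (fun acc piece => acc ++ piece) init).toList
      = init.toList ++ l.flatMap String.toList := by
  induction l generalizing init with
  | nil => simp
  | cons p l ih => simp [List.foldl, ih, String.toList_append]

theorem pvEqChars_eq_decide (as bs : List Char) :
    pvEqChars as bs = decide (as = bs) := by
  induction as generalizing bs with
  | nil => cases bs <;> simp [pvEqChars]
  | cons a as ih =>
      cases bs with
      | nil => simp [pvEqChars]
      | cons b bs => simp [pvEqChars, ih, beq_eq_decide, Bool.decide_and]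

-- ===== VERDICT (by name: the statement is the Claim_ definition above) =====
theorem arrayStringsAreEqual_spec : Claim_equal_arrayStringsAreEqual := by
  intro word1 word2 _
  unfold Spec_arrayStringsAreEqual arrayStringsAreEqual arrayStringsAreEqual_alt
  rw [pvEqChars_eq_decide]
  rw [Bool.eq_iff_iff]
  simp only [beq_iff_eq, decide_eq_true_eq]
  constructor
  · intro h
    have := congrArg String.toList h
    simpa [pvFoldl_toList] using this
  · intro h
    apply String.ext
    simpa [pvFoldl_toList] using h
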